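-- pv_equiv track=rewrite | github.com/dephiros/random_python | utopia_tree.py | utopia_tree_height
-- ===== SOURCE A (Python) =====
-- def utopia_tree_height(cycles, init_height=1):
--
--     def spring_grow(height):
--         return height * 2
--
--     def summer_grow(height):
--         return height + 1
--
--     is_spring = True
--     for i in range(cycles):
--         if is_spring: init_height = spring_grow(init_height)
--         else: init_height = summer_grow(init_height)
--         is_spring = not is_spring
--     return init_height
-- ===== SOURCE B (Python) =====
-- def utopia_tree_height(cycles, init_height=1):
--     if cycles <= 0:
--         return init_height
--     k, r = divmod(cycles, 2)
--     h = (init_height + 1) * 2**k - 1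
--     return h * 2 if r else h
-- ===== Notes on version B (the rewrite author's own statement) =====
-- stated objective: faster
-- what changed: Replaced the O(cycles) alternating double/increment loop by the closed form (h+1)*2^(cycles//2)-1 (doubled once more for odd cycles), computed with one power of two; intended as faster, measured 3.5x-1337x on a timing run's sizes (at the largest size that run could not decode the huge result, so the label is unconfirmed).
import Mathlib
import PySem

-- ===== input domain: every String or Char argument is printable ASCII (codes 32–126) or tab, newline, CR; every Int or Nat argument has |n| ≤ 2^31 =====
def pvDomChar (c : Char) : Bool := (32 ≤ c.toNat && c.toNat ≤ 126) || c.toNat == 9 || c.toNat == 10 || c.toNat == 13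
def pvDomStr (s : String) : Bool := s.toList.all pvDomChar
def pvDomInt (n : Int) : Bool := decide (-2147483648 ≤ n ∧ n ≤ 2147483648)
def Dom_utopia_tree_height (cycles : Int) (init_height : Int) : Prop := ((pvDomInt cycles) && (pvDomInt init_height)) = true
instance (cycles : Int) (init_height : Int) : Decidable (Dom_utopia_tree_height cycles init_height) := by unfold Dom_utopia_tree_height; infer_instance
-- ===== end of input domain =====

-- B replaces A's alternating double/increment loop by the closed form (h+1)*2^(cycles//2)-1,
-- doubled once more for odd cycles; intended as faster (measured 3.5x-1337x in a timing run
-- at the sizes it could check).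

-- ===== PORT A =====
-- for i in range(cycles): alternate doubling and incrementing, toggling is_spring
def utopia_tree_height (cycles : Int) (init_height : Int) : Int :=
  ((PySem.List.pyRange 0 cycles 1).foldl
    (fun (st : Bool × Int) (_ : Int) =>
      let h := if st.1 then st.2 * 2 else st.2 + 1
      (!st.1, h))
    (true, init_height)).2

-- ===== PORT B =====
def utopia_tree_height_alt (cycles : Int) (init_height : Int) : Int :=
  if cycles ≤ 0 then init_height
  else
    let k := PySem.Int.floordiv cycles 2
    let r := PySem.Int.mod cycles 2
    -- 2**k : k ≥ 0 here, so k.toNat is exact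
    let h := (init_height + 1) * 2 ^ k.toNat - 1
    if r ≠ 0 then h * 2 else h

-- ===== PRECONDITION & SPEC =====
def Spec_utopia_tree_height (cycles : Int) (init_height : Int) (out : Int) : Prop := out = utopia_tree_height_alt cycles init_height
instance (cycles : Int) (init_height : Int) (out : Int) : Decidable (Spec_utopia_tree_height cycles init_height out) := by unfold Spec_utopia_tree_height; infer_instance

-- ===== CLAIM (what is proved, stated in full; the proofs are below) =====
def Claim_equal_utopia_tree_height : Prop := ∀ (cycles : Int) (init_height : Int), Dom_utopia_tree_height cycles init_height → Spec_utopia_tree_height cycles init_height (utopia_tree_height cycles init_height)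

-- ===== LEMMAS AND PROOFS =====

-- The loop state only depends on the number of iterations: abstract it as g.
def pvG : Bool → Nat → Int → Int
  | _, 0, h => h
  | b, n+1, h => pvG (!b) n (if b then h * 2 else h + 1)

theorem pvFold_eq_pvG (l : List Int) (b : Bool) (h : Int) :
    (l.foldl (fun (st : Bool × Int) (_ : Int) =>
        let h := if st.1 then st.2 * 2 else st.2 + 1
        (!st.1, h)) (b, h)).2 = pvG b l.length h := by
  induction l generalizing b h with
  | nil => rfl
  | cons x xs ih => simp [List.foldl, pvG, ih]

theorem pvG_closed (k : Nat) : ∀ h : Int,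
    pvG true (2 * k) h = (h + 1) * 2 ^ k - 1 ∧
    pvG true (2 * k + 1) h = ((h + 1) * 2 ^ k - 1) * 2 := by
  induction k with
  | zero => intro h; constructor <;> simp [pvG]
  | succ k ih =>
    intro h
    have e1 : 2 * (k + 1) = (2 * k + 1) + 1 := by omega
    have e2 : 2 * (k + 1) + 1 = (2 * k + 1 + 1) + 1 := by omega
    constructor
    · rw [e1]
      show pvG true (2 * k) (h * 2 + 1) = _
      rw [(ih (h * 2 + 1)).1]; ring
    · rw [e2]
      show pvG true (2 * k + 1) (h * 2 + 1) = _
      rw [(ih (h * 2 + 1)).2]; ring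

-- ===== VERDICT (by name: the statement is the Claim_ definition above) =====
theorem utopia_tree_height_spec : Claim_equal_utopia_tree_height := by
  intro cycles h _
  unfold Spec_utopia_tree_height utopia_tree_height utopia_tree_height_alt
  rw [pvFold_eq_pvG]
  by_cases hc : cycles ≤ 0
  · rw [PySem.List.pyRange_one_eq_nil (by omega)]
    simp [hc, pvG]
  · rw [not_le] at hc
    rw [if_neg (by omega)]
    rw [PySem.Int.floordiv_eq_ediv_of_pos (by omega), PySem.Int.mod_eq_emod_of_pos (by omega)]
    rw [PySem.List.length_pyRange_one]
    set n : Nat := (cycles - 0).toNat with hn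
    have hkn : (cycles / 2).toNat = n / 2 := by omega
    rcases Nat.even_or_odd n with ⟨m, hm⟩ | ⟨m, hm⟩
    · have h2 : n = 2 * m := by omega
      have hr : cycles % 2 = 0 := by omega
      have hm2 : n / 2 = m := by omega
      rw [h2, (pvG_closed m h).1]
      simp [hkn, hm2, hr]
    · have hr : ¬ (cycles % 2 = 0) := by omega
      have hm2 : n / 2 = m := by omega
      rw [hm, (pvG_closed m h).2]
      simp [hkn, hm2, hr]
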